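-- pv_equiv track=rewrite | github.com/drdnar/open-adventure-ce | make_dungeon.py | bigdump
-- ===== SOURCE A (Python) =====
-- def bigdump(arr):
--     out = ""
--     for (i, entry) in enumerate(arr):
--         if i % 10 == 0:
--             if out and out[-1] == ' ':
--                 out = out[:-1]
--             out += "\n    "
--         out += str(arr[i]).lower() + ", "
--     out = out[:-2] + "\n"
--     return out
-- ===== SOURCE B (Python) =====
-- def bigdump(arr):
--     if not arr:
--         return "\n"
--     chunks = [arr[i:i+10] for i in range(0, len(arr), 10)]
--     lines = [", ".join(str(x).lower() for x in chunk) for chunk in chunks]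
--     return "\n    " + ",\n    ".join(lines) + "\n"
-- ===== Notes on version B (the rewrite author's own statement) =====
-- stated objective: simpler
-- what changed: Replaces A's single accumulator loop with its look-at-last-character strip logic by slicing the array into chunks of 10, joining each chunk with ', ' and the chunk lines with ',\n ' (plus an empty-input guard).
import Mathlib
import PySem

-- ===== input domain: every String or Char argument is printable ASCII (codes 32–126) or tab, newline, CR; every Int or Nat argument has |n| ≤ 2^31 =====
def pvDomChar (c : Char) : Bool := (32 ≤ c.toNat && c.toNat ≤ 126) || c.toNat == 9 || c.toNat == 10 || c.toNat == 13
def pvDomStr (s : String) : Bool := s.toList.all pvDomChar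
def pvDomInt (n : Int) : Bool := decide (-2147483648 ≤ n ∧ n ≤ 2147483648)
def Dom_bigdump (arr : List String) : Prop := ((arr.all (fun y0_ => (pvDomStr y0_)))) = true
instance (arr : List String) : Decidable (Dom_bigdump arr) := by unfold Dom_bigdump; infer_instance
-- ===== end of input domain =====

-- B replaces A's accumulator loop with its character-peek strip logic by chunking into
-- tens, joining each chunk with ", " and the chunk lines with ",\n    "; objective: simpler.

-- ===== PORT A =====
-- A's strip: "if out and out[-1] == ' ': out = out[:-1]"
def stripSp (out : List Char) : List Char :=
  if out ≠ [] ∧ PySem.List.pyGet? out (-1) = some ' '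
  then PySem.List.slice out none (some (-1)) else out

-- one iteration of A's loop body (p.2 is arr[i], the enumerated element)
def bigdumpStep (out : List Char) (p : Int × String) : List Char :=
  (if PySem.Int.mod p.1 10 = 0 then stripSp out ++ "\n    ".toList else out)
    ++ PySem.Chars.lower p.2.toList ++ ", ".toList

def bigdump (arr : List String) : String :=
  let out := (PySem.List.enumerate arr 0).foldl bigdumpStep []
  String.mk (PySem.List.slice out none (some (-2)) ++ "\n".toList)

-- ===== PORT B =====
def bigdump_alt (arr : List String) : String :=
  if arr = [] then "\n"
  else
    let chunks := (PySem.List.pyRange 0 arr.length 10).map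
      (fun i => PySem.List.slice arr (some i) (some (i + 10)))
    let lines := chunks.map
      (fun c => PySem.Chars.join ", ".toList (c.map (fun x => PySem.Chars.lower x.toList)))
    String.mk ("\n    ".toList ++ PySem.Chars.join ",\n    ".toList lines ++ "\n".toList)

-- ===== PRECONDITION & SPEC =====
def Spec_bigdump (arr : List String) (out : String) : Prop := out = bigdump_alt arr
instance (arr : List String) (out : String) : Decidable (Spec_bigdump arr out) := by unfold Spec_bigdump; infer_instance

-- ===== CLAIM (what is proved, stated in full; the proofs are below) =====
def Claim_equal_bigdump : Prop := ∀ (arr : List String), Dom_bigdump arr → Spec_bigdump arr (bigdump arr)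

-- ===== LEMMAS AND PROOFS =====

-- the chunking [arr[i:i+10] for i in range(0,len(arr),10)] as structural recursion
def chunks10 (l : List String) : List (List String) :=
  if h : l = [] then [] else
    l.take 10 :: chunks10 (l.drop 10)
  termination_by l.length
  decreasing_by
    cases l with
    | nil => exact absurd rfl h
    | cons x t => simp [List.length_drop]

def lineOf (c : List String) : List Char :=
  PySem.Chars.join ", ".toList (c.map (fun x => PySem.Chars.lower x.toList))

def joinLines (cs : List (List String)) : List Char :=
  PySem.Chars.join ",\n    ".toList (cs.map lineOf)

-- every element lowered, each with its trailing ", "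
def body (l : List String) : List Char :=
  l.flatMap (fun x => PySem.Chars.lower x.toList ++ ", ".toList)

lemma chunks10_ne_nil (l : List String) (h : l ≠ []) : chunks10 l ≠ [] := by
  rw [chunks10]; simp [h]

lemma body_eq_line (c : List String) (h : c ≠ []) :
    body c = lineOf c ++ ", ".toList := by
  induction c with
  | nil => exact absurd rfl h
  | cons x t ih =>
    cases t with
    | nil => simp [body, lineOf, PySem.Chars.join_singleton]
    | cons y r =>
      have hb : body (x :: y :: r) =
          PySem.Chars.lower x.toList ++ ", ".toList ++ body (y :: r) := by
        simp [body]
      rw [hb, ih (by simp)]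
      have hl : lineOf (x :: y :: r) =
          PySem.Chars.lower x.toList ++ ", ".toList ++ lineOf (y :: r) := by
        simp only [lineOf, List.map_cons]
        rw [PySem.Chars.join_cons_cons]
      rw [hl]; simp

lemma joinLines_cons (c : List String) (cs : List (List String)) (h : cs ≠ []) :
    joinLines (c :: cs) = lineOf c ++ ",\n    ".toList ++ joinLines cs := by
  cases cs with
  | nil => exact absurd rfl h
  | cons d r =>
    simp only [joinLines, List.map_cons]
    rw [PySem.Chars.join_cons_cons]

lemma stripSp_comma (q : List Char) : stripSp (q ++ ", ".toList) = q ++ ",".toList := by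
  rw [stripSp, if_pos]
  · rw [PySem.List.slice_to_neg_one]
    rw [show q ++ ", ".toList = (q ++ ",".toList) ++ [' '] by simp, List.dropLast_concat]
  · constructor
    · simp
    · simp [PySem.List.pyGet?, PySem.List.pyIdx?]

-- chunks10 as a map over Nat indices
lemma range_take_drop_eq_chunks10 : ∀ (n : Nat) (l : List String), l.length = n →
    (List.range ((l.length + 9) / 10)).map (fun k => (l.drop (10 * k)).take 10) = chunks10 l := by
  intro n
  induction n using Nat.strong_induction_on with
  | _ n ih =>
    intro l hn
    by_cases hl : l = []
    · subst hl; rw [chunks10]; simp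
    · have hm : 1 ≤ l.length := List.length_pos_iff.mpr hl
      have hsucc : (l.length + 9) / 10 = (l.length - 10 + 9) / 10 + 1 := by omega
      have hrec := ih (l.drop 10).length (by simp only [List.length_drop, ← hn]; omega)
        (l.drop 10) rfl
      simp only [List.length_drop] at hrec
      have htail : List.map ((fun k => List.take 10 (List.drop (10 * k) l)) ∘ Nat.succ)
          (List.range ((l.length - 10 + 9) / 10)) = chunks10 (List.drop 10 l) := by
        rw [← hrec]
        apply List.map_congr_left
        intro k _
        simp only [Function.comp_apply, List.drop_drop]
        congr 2
        omega
      rw [hsucc, List.range_succ_eq_map, List.map_cons, List.map_map, chunks10, dif_neg hl,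
        htail]
      simp

-- B's range-of-slices comprehension computes chunks10
lemma range_slices_eq_chunks10 (l : List String) :
    (PySem.List.pyRange 0 l.length 10).map
      (fun i => PySem.List.slice l (some i) (some (i + 10))) = chunks10 l := by
  rw [PySem.List.pyRange_of_pos 0 l.length (by norm_num)]
  by_cases hl : l = []
  · subst hl; rw [chunks10]; simp
  · rw [if_pos (by simp [List.length_pos_iff.mpr hl] : (0:Int) < l.length)]
    have hcnt : (((l.length : Int) - 0 + 10 - 1) / 10).toNat = (l.length + 9) / 10 := by
      omega
    rw [hcnt, List.map_map]
    rw [← range_take_drop_eq_chunks10 l.length l rfl]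
    apply List.map_congr_left
    intro k _
    show PySem.List.slice l (some (0 + 10 * (k : Int))) (some (0 + 10 * (k : Int) + 10))
        = (l.drop (10 * k)).take 10
    rw [show (0 + 10 * (k : Int)) = ((10 * k : Nat) : Int) by push_cast; ring,
      show ((10 * k : Nat) : Int) + 10 = ((10 * k + 10 : Nat) : Int) by push_cast; ring,
      PySem.List.slice_natCast]
    congr 1
    omega

-- a stretch of indices with no multiple of 10: the loop just appends
lemma fold_within (l : List String) (s : Int) (out : List Char)
    (h : ∀ p ∈ PySem.List.enumerate l s, PySem.Int.mod p.1 10 ≠ 0) :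
    (PySem.List.enumerate l s).foldl bigdumpStep out = out ++ body l := by
  induction l generalizing s out with
  | nil => simp [PySem.List.enumerate_nil, body]
  | cons x t ih =>
    rw [PySem.List.enumerate_cons, List.foldl_cons]
    have hx : PySem.Int.mod s 10 ≠ 0 := by
      have := h (s, x) (by rw [PySem.List.enumerate_cons]; exact List.mem_cons_self)
      simpa using this
    rw [show bigdumpStep out (s, x) = out ++ PySem.Chars.lower x.toList ++ ", ".toList by
      simp only [bigdumpStep]; rw [if_neg hx]]
    rw [ih (s + 1) _ (fun p hp => h p (by
      rw [PySem.List.enumerate_cons]; exact List.mem_cons_of_mem _ hp))]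
    simp [body]

-- the loop over any chunk-aligned tail, from a state st whose stripped form is P
lemma fold_aligned : ∀ (n : Nat) (l : List String), l.length = n → l ≠ [] →
    ∀ (st P : List Char) (s : Int), 0 ≤ s → PySem.Int.mod s 10 = 0 → stripSp st = P →
    (PySem.List.enumerate l s).foldl bigdumpStep st =
      P ++ "\n    ".toList ++ joinLines (chunks10 l) ++ ", ".toList := by
  intro n
  induction n using Nat.strong_induction_on with
  | _ n ih =>
    intro l hn hl st P s hs0 hs hstrip
    obtain ⟨x, t, rfl⟩ := List.exists_cons_of_ne_nil hl
    -- split off the first chunk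
    have hL : PySem.List.enumerate (x :: t) s =
        PySem.List.enumerate ((x :: t).take 10) s ++
        PySem.List.enumerate ((x :: t).drop 10) (s + ((x :: t).take 10).length) := by
      conv_lhs => rw [← List.take_append_drop 10 (x :: t)]
      rw [PySem.List.enumerate_append]
    rw [hL, List.foldl_append]
    have hc : (x :: t).take 10 = x :: t.take 9 := rfl
    rw [hc, PySem.List.enumerate_cons, List.foldl_cons]
    -- the chunk-opening step
    have hstep : bigdumpStep st (s, x) =
        (P ++ "\n    ".toList) ++ (PySem.Chars.lower x.toList ++ ", ".toList) := by
      simp only [bigdumpStep]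
      rw [if_pos hs, hstrip]
      simp
    rw [hstep]
    -- the nine in-chunk steps
    have hin : ∀ p ∈ PySem.List.enumerate (t.take 9) (s + 1), PySem.Int.mod p.1 10 ≠ 0 := by
      intro p hp
      rw [PySem.List.mem_enumerate_iff] at hp
      obtain ⟨k, hk, rfl⟩ := hp
      have hk9 : k < 9 := lt_of_lt_of_le hk (by simpa using List.length_take_le 9 t)
      rw [PySem.Int.mod_eq_emod_of_pos (by norm_num)] at hs ⊢
      omega
    rw [fold_within _ _ _ hin]
    have hbody : PySem.Chars.lower x.toList ++ ", ".toList ++ body (t.take 9)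
        = lineOf (x :: t.take 9) ++ ", ".toList := by
      have := body_eq_line (x :: t.take 9) (by simp)
      simpa [body] using this
    -- chunks10 unfolding
    have hch : chunks10 (x :: t) = (x :: t.take 9) :: chunks10 (t.drop 9) := by
      rw [chunks10]; simp [hc]
    by_cases hrest : t.drop 9 = []
    · rw [show (x :: t).drop 10 = t.drop 9 from rfl, hrest, PySem.List.enumerate_nil,
        List.foldl_nil]
      rw [hch, hrest, show chunks10 [] = [] from by rw [chunks10]; simp]
      rw [joinLines, List.map_cons, List.map_nil, PySem.Chars.join_singleton]
      simp only [List.append_assoc] at hbody ⊢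
      rw [hbody]
    · -- recurse on the remaining chunks
      have h9 : 9 ≤ t.length := by
        by_contra hlt
        exact hrest (List.drop_eq_nil_of_le (by omega))
      have hlen10 : (x :: t.take 9).length = 10 := by
        simp; omega
      rw [show (x :: t).drop 10 = t.drop 9 from rfl, hlen10]
      have hrec := ih (t.drop 9).length (by simp only [List.length_drop, List.length_cons, ← hn]; omega) (t.drop 9) rfl hrest
        ((P ++ "\n    ".toList ++ lineOf (x :: t.take 9)) ++ ", ".toList)
        ((P ++ "\n    ".toList ++ lineOf (x :: t.take 9)) ++ ",".toList)
        (s + 10) (by omega)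
        (by rw [PySem.Int.mod_eq_emod_of_pos (by norm_num)] at hs ⊢; omega)
        (stripSp_comma _)
      rw [show (P ++ "\n    ".toList) ++ (PySem.Chars.lower x.toList ++ ", ".toList) ++ body (t.take 9)
          = (P ++ "\n    ".toList ++ lineOf (x :: t.take 9)) ++ ", ".toList by
        simp only [List.append_assoc] at hbody ⊢
        rw [hbody]]
      simp only [Nat.cast_ofNat]
      rw [hrec, hch, joinLines_cons _ _ (chunks10_ne_nil _ hrest)]
      simp

-- the whole loop, for nonempty input
lemma fold_main (arr : List String) (h : arr ≠ []) :
    (PySem.List.enumerate arr 0).foldl bigdumpStep [] =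
      "\n    ".toList ++ joinLines (chunks10 arr) ++ ", ".toList := by
  have := fold_aligned arr.length arr rfl h [] [] 0 (by norm_num) (by decide)
    (by rw [stripSp]; simp)
  simpa using this

-- ===== VERDICT (by name: the statement is the Claim_ definition above) =====
theorem bigdump_spec : Claim_equal_bigdump := by
  intro arr _
  unfold Spec_bigdump
  by_cases h : arr = []
  · subst h; decide
  · rw [bigdump, bigdump_alt, if_neg h]
    rw [fold_main arr h, range_slices_eq_chunks10]
    rw [show ("\n    ".toList ++ joinLines (chunks10 arr) ++ ", ".toList) =
        ("\n    ".toList ++ joinLines (chunks10 arr)) ++ ", ".toList by simp]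
    rw [show ((-2 : Int)) = -OfNat.ofNat 2 from rfl]
    rw [PySem.List.slice_to_neg_ofNat _ 2 (by omega)]
    rw [show (("\n    ".toList ++ joinLines (chunks10 arr)) ++ ", ".toList).length - 2
        = ("\n    ".toList ++ joinLines (chunks10 arr)).length by simp]
    rw [List.take_left]
    rfl
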